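-- pv_equiv track=rewrite | github.com/gvidalquadras/Automatic-Alert-Generation | src/automatic_alert/alert_generation.py | extract_ner_entity
-- ===== SOURCE A (Python) =====
-- def extract_ner_entity(ner_tags):
--     """
--     Extract the first relevant entity from NER-tagged tokens with priority:
--     1. B-PER or B-ORG
--     2. B-LOC or B-MISC
--     """
--     # Pass 1: look for B-PER or B-ORG
--     for priority_tags in [['B-PER', 'B-ORG'], ['B-LOC', 'B-MISC']]:
--         entity_words = []
--         capturing = False
--         current_type = None
--
--         for word, tag in ner_tags:
--             if not capturing:
--                 if tag in priority_tags:
--                     capturing = True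
--                     entity_words.append(word)
--                     current_type = tag.split('-')[1]
--             else:
--                 if tag == f'I-{current_type}':
--                     entity_words.append(word)
--                 else:
--                     break  # Stop at the first complete entity
--
--         if entity_words:
--             break  # Stop if we found a valid entity
--
--     entity = " ".join(entity_words)
--     return entity
-- ===== SOURCE B (Python) =====
-- def extract_ner_entity(ner_tags):
--     # Single pass: chunk the tagged tokens into entity spans, then pick the
--     # first span by priority (PER/ORG before LOC/MISC).
--     spans = []
--     cur = None  # (entity_type, words) of the currently open span
--     for word, tag in ner_tags:
--         if tag.startswith('B-'):
--             if cur is not None: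
--                 spans.append(cur)
--             cur = (tag[2:], [word])
--         elif cur is not None and tag == 'I-' + cur[0]:
--             cur[1].append(word)
--         else:
--             if cur is not None:
--                 spans.append(cur)
--             cur = None
--     if cur is not None:
--         spans.append(cur)
--     for group in (('PER', 'ORG'), ('LOC', 'MISC')):
--         for entity_type, words in spans:
--             if entity_type in group:
--                 return ' '.join(words)
--     return ''
-- ===== Notes on version B (the rewrite author's own statement) =====
-- stated objective: alternative
-- what changed: A makes up to two scan-and-break passes over the tokens, one per priority group; B makes a single chunking pass that segments the tagged tokens into entity spans and then selects the first span by priority (PER/ORG before LOC/MISC) from the span list.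
import Mathlib
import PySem

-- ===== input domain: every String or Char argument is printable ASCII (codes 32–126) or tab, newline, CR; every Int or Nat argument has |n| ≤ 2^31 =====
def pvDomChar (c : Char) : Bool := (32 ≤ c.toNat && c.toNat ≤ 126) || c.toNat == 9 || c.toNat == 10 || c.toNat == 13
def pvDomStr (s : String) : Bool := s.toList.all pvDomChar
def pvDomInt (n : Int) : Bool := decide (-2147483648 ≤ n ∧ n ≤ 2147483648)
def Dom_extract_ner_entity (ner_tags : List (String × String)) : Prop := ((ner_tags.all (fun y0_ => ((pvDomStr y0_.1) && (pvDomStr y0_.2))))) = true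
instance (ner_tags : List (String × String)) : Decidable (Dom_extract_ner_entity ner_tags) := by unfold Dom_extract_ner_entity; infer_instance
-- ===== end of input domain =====

-- B replaces A's two scan-and-break passes over the tokens by one chunking pass into
-- entity spans followed by a priority selection over the spans (objective: alternative).

-- ===== PORT A =====
-- tag.split('-')[1]; the index always exists here: A only applies it to tags of the
-- priority lists ('B-PER', …), all of which contain a '-'.
def pvA_type (tag : String) : String :=
  (PySem.List.pyGet? ((PySem.Str.split? tag "-").getD []) 1).getD ""

-- A's inner 'for word, tag in ner_tags' loop; Python's (capturing, current_type) pair of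
-- variables is the Option: none = not capturing, some t = capturing with current_type t.
def pvA_loop (priority : List String) : List (String × String) → List String → Option String → List String
  | [], acc, _ => acc
  | (word, tag) :: rest, acc, none =>
      if tag ∈ priority then pvA_loop priority rest (acc ++ [word]) (some (pvA_type tag))
      else pvA_loop priority rest acc none
  | (word, tag) :: rest, acc, some current_type =>
      if tag = "I-" ++ current_type then pvA_loop priority rest (acc ++ [word]) (some current_type)
      else acc  -- break: stop at the first complete entity

def extract_ner_entity (ner_tags : List (String × String)) : String :=
  let w1 := pvA_loop ["B-PER", "B-ORG"] ner_tags [] none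
  -- 'if entity_words: break' — the second pass runs only when the first found nothing
  let entity_words := if w1 = [] then pvA_loop ["B-LOC", "B-MISC"] ner_tags [] none else w1
  PySem.Str.join " " entity_words

-- ===== PORT B =====
def pvB_type (tag : String) : String := PySem.Str.slice tag (some 2) none  -- tag[2:]

-- single chunking pass: cur is the currently open span (type, words)
def pvB_chunk : List (String × String) → Option (String × List String) → List (String × List String)
  | [], cur => cur.toList
  | (word, tag) :: rest, cur =>
      if PySem.Str.startswith tag "B-" then
        cur.toList ++ pvB_chunk rest (some (pvB_type tag, [word]))
      else
        match cur with
        | some (t, ws) =>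
            if tag = "I-" ++ t then pvB_chunk rest (some (t, ws ++ [word]))
            else (t, ws) :: pvB_chunk rest none
        | none => pvB_chunk rest none

-- inner 'for entity_type, words in spans' loop of the selection
def pvB_select (group : List String) : List (String × List String) → Option (List String)
  | [] => none
  | (t, ws) :: rest => if t ∈ group then some ws else pvB_select group rest

def extract_ner_entity_alt (ner_tags : List (String × String)) : String :=
  let spans := pvB_chunk ner_tags none
  match pvB_select ["PER", "ORG"] spans with
  | some ws => PySem.Str.join " " ws
  | none =>
    match pvB_select ["LOC", "MISC"] spans with
    | some ws => PySem.Str.join " " ws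
    | none => ""

-- ===== PRECONDITION & SPEC =====
def Spec_extract_ner_entity (ner_tags : List (String × String)) (out : String) : Prop := out = extract_ner_entity_alt ner_tags
instance (ner_tags : List (String × String)) (out : String) : Decidable (Spec_extract_ner_entity ner_tags out) := by unfold Spec_extract_ner_entity; infer_instance

-- ===== CLAIM (what is proved, stated in full; the proofs are below) =====
def Claim_equal_extract_ner_entity : Prop := ∀ (ner_tags : List (String × String)), Dom_extract_ner_entity ner_tags → Spec_extract_ner_entity ner_tags (extract_ner_entity ner_tags)

-- ===== LEMMAS AND PROOFS =====

-- Abstract, accumulator-free reading of A's inner loop.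
def pvCollect (ty : String) : List (String × String) → List String
  | [] => []
  | (w, t) :: rest => if t = "I-" ++ ty then w :: pvCollect ty rest else []

def pvScan (G : List String) : List (String × String) → Option (List String)
  | [] => none
  | (w, t) :: rest => if t ∈ G then some (w :: pvCollect (pvA_type t) rest) else pvScan G rest

theorem pvA_loop_collect (G : List String) (ty : String) :
    ∀ (tags : List (String × String)) (acc : List String),
      pvA_loop G tags acc (some ty) = acc ++ pvCollect ty tags := by
  intro tags
  induction tags with
  | nil => intro acc; simp [pvA_loop, pvCollect]
  | cons p rest ih =>
      obtain ⟨w, t⟩ := p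
      intro acc
      by_cases h : t = "I-" ++ ty
      · simp [pvA_loop, pvCollect, h, ih]
      · simp [pvA_loop, pvCollect, h]

theorem pvA_loop_scan (G : List String) :
    ∀ (tags : List (String × String)) (acc : List String),
      pvA_loop G tags acc none = acc ++ (pvScan G tags).getD [] := by
  intro tags
  induction tags with
  | nil => intro acc; simp [pvA_loop, pvScan]
  | cons p rest ih =>
      obtain ⟨w, t⟩ := p
      intro acc
      by_cases h : t ∈ G
      · simp [pvA_loop, pvScan, h, pvA_loop_collect]
      · simp [pvA_loop, pvScan, h, ih]

theorem pvScan_ne_some_nil (G : List String) :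
    ∀ (tags : List (String × String)), pvScan G tags ≠ some [] := by
  intro tags
  induction tags with
  | nil => simp [pvScan]
  | cons p rest ih =>
      obtain ⟨w, t⟩ := p
      by_cases h : t ∈ G <;> simp [pvScan, h, ih]

-- String facts
theorem startswith_B_iff (tag : String) :
    PySem.Str.startswith tag "B-" = true ↔ ['B', '-'] <+: tag.toList := by
  simp [PySem.Chars.startswith_iff]

theorem pvB_type_toList (tag : String) : (pvB_type tag).toList = tag.toList.drop 2 := by
  simp [pvB_type, PySem.Str.toList_slice, PySem.List.slice_from]

theorem tag_B_char (tag u : String) :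
    (PySem.Str.startswith tag "B-" = true ∧ pvB_type tag = u) ↔ tag = "B-" ++ u := by
  constructor
  · rintro ⟨hs, ht⟩
    rw [startswith_B_iff] at hs
    obtain ⟨v, hv⟩ := hs
    apply String.toList_inj.mp
    rw [String.toList_append, ← hv]
    have := pvB_type_toList tag
    rw [ht] at this
    rw [← hv] at this
    simp at this
    simp [this]
  · rintro rfl
    constructor
    · rw [startswith_B_iff, String.toList_append]
      exact ⟨u.toList, rfl⟩
    · apply String.toList_inj.mp
      rw [pvB_type_toList, String.toList_append]
      simp

theorem B_ne_I (tag ty : String) (h : PySem.Str.startswith tag "B-" = true) :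
    tag ≠ "I-" ++ ty := by
  intro he
  rw [startswith_B_iff] at h
  obtain ⟨v, hv⟩ := h
  rw [he, String.toList_append] at hv
  simp_all

theorem select_chunk_capturing (TG : List String) (ty : String) (hty : ty ∈ TG) :
    ∀ (tags : List (String × String)) (ws : List String),
      pvB_select TG (pvB_chunk tags (some (ty, ws))) = some (ws ++ pvCollect ty tags) := by
  intro tags
  induction tags with
  | nil => intro ws; simp only [pvB_chunk, Option.toList_some, pvB_select, pvCollect]
           rw [if_pos hty]; simp
  | cons p rest ih =>
      obtain ⟨w, t⟩ := p
      intro ws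
      by_cases hb : PySem.Str.startswith t "B-" = true
      · have hne : t ≠ "I-" ++ ty := B_ne_I t ty hb
        simp only [pvB_chunk]
        rw [if_pos hb]
        simp only [Option.toList_some, List.singleton_append, pvB_select]
        rw [if_pos hty]
        simp [pvCollect, hne]
      · by_cases hi : t = "I-" ++ ty
        · simp only [pvB_chunk]
          rw [if_neg hb, if_pos hi, ih]
          simp [pvCollect, hi]
        · simp only [pvB_chunk]
          rw [if_neg hb, if_neg hi]
          simp only [pvB_select]
          rw [if_pos hty]
          simp [pvCollect, hi]

theorem select_chunk (G TG : List String)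
    (hrel : ∀ tag, (PySem.Str.startswith tag "B-" = true ∧ pvB_type tag ∈ TG) ↔ tag ∈ G)
    (htype : ∀ tag ∈ G, pvA_type tag = pvB_type tag) :
    ∀ (tags : List (String × String)) (cur : Option (String × List String)),
      (∀ t ws, cur = some (t, ws) → t ∉ TG) →
      pvB_select TG (pvB_chunk tags cur) = pvScan G tags := by
  intro tags
  induction tags with
  | nil =>
      intro cur hcur
      match cur with
      | none => simp [pvB_chunk, pvB_select, pvScan]
      | some (t, ws) =>
          have hn := hcur t ws rfl
          simp only [pvB_chunk, Option.toList_some, pvB_select, pvScan]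
          rw [if_neg hn]
  | cons p rest ih =>
      intro cur hcur
      obtain ⟨w, t⟩ := p
      have selcur : ∀ L, pvB_select TG (cur.toList ++ L) = pvB_select TG L := by
        intro L
        match cur with
        | none => simp
        | some (t0, ws0) =>
            have hn := hcur t0 ws0 rfl
            simp only [Option.toList_some, List.singleton_append, pvB_select]
            rw [if_neg hn]
      by_cases hb : PySem.Str.startswith t "B-" = true
      · by_cases hin : pvB_type t ∈ TG
        · have hG : t ∈ G := (hrel t).mp ⟨hb, hin⟩
          have hT := htype t hG
          simp only [pvB_chunk]
          rw [if_pos hb, selcur,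
              select_chunk_capturing TG (pvB_type t) hin rest [w]]
          simp only [pvScan]
          rw [if_pos hG]
          simp [hT]
        · have hG : t ∉ G := fun hG => hin ((hrel t).mpr hG).2
          simp only [pvB_chunk]
          rw [if_pos hb, selcur,
              ih (some (pvB_type t, [w])) (by rintro t' ws' h; cases h; exact hin)]
          simp only [pvScan]
          rw [if_neg hG]
      · have hG : t ∉ G := fun hG => hb ((hrel t).mpr hG).1
        match cur with
        | none =>
            simp only [pvB_chunk]
            rw [if_neg hb, ih none (by simp)]
            simp only [pvScan]
            rw [if_neg hG]
        | some (t0, ws0) =>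
            have ht0 := hcur t0 ws0 rfl
            by_cases hi : t = "I-" ++ t0
            · simp only [pvB_chunk]
              rw [if_neg hb, if_pos hi,
                  ih (some (t0, ws0 ++ [w])) (by rintro t' ws' h; cases h; exact ht0)]
              simp only [pvScan]
              rw [if_neg hG]
            · simp only [pvB_chunk]
              rw [if_neg hb, if_neg hi]
              simp only [pvB_select]
              rw [if_neg ht0, ih none (by simp)]
              simp only [pvScan]
              rw [if_neg hG]

theorem hrel1 : ∀ tag, (PySem.Str.startswith tag "B-" = true ∧ pvB_type tag ∈ (["PER", "ORG"] : List String)) ↔ tag ∈ (["B-PER", "B-ORG"] : List String) := by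
  intro tag
  simp only [List.mem_cons, List.not_mem_nil, or_false]
  constructor
  · rintro ⟨hs, h | h⟩
    · exact Or.inl ((tag_B_char tag "PER").mp ⟨hs, h⟩)
    · exact Or.inr ((tag_B_char tag "ORG").mp ⟨hs, h⟩)
  · rintro (rfl | rfl)
    · exact ⟨by decide, Or.inl (by decide)⟩
    · exact ⟨by decide, Or.inr (by decide)⟩

theorem hrel2 : ∀ tag, (PySem.Str.startswith tag "B-" = true ∧ pvB_type tag ∈ (["LOC", "MISC"] : List String)) ↔ tag ∈ (["B-LOC", "B-MISC"] : List String) := by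
  intro tag
  simp only [List.mem_cons, List.not_mem_nil, or_false]
  constructor
  · rintro ⟨hs, h | h⟩
    · exact Or.inl ((tag_B_char tag "LOC").mp ⟨hs, h⟩)
    · exact Or.inr ((tag_B_char tag "MISC").mp ⟨hs, h⟩)
  · rintro (rfl | rfl)
    · exact ⟨by decide, Or.inl (by decide)⟩
    · exact ⟨by decide, Or.inr (by decide)⟩

theorem htype1 : ∀ tag ∈ (["B-PER", "B-ORG"] : List String), pvA_type tag = pvB_type tag := by
  intro tag h
  simp only [List.mem_cons, List.not_mem_nil, or_false] at h
  rcases h with rfl | rfl <;> decide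

theorem htype2 : ∀ tag ∈ (["B-LOC", "B-MISC"] : List String), pvA_type tag = pvB_type tag := by
  intro tag h
  simp only [List.mem_cons, List.not_mem_nil, or_false] at h
  rcases h with rfl | rfl <;> decide

-- ===== VERDICT (by name: the statement is the Claim_ definition above) =====
theorem extract_ner_entity_spec : Claim_equal_extract_ner_entity := by
  intro ner_tags _
  unfold Spec_extract_ner_entity extract_ner_entity extract_ner_entity_alt
  simp only [pvA_loop_scan, List.nil_append,
    select_chunk _ _ hrel1 htype1 ner_tags none (by simp),
    select_chunk _ _ hrel2 htype2 ner_tags none (by simp)]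
  cases h1 : pvScan ["B-PER", "B-ORG"] ner_tags with
  | some ws =>
      have hne : ws ≠ [] := by
        intro h; rw [h] at h1; exact pvScan_ne_some_nil _ _ h1
      simp [hne]
  | none =>
      cases h2 : pvScan ["B-LOC", "B-MISC"] ner_tags with
      | some ws2 => simp
      | none => simp; decide
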